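-- pv_equiv track=rewrite | github.com/eclipse-qrisp/Qrisp | src/qrisp/algorithms/vqe/vqe_benchmark_data.py | ilog
-- ===== SOURCE A (Python) =====
-- def ilog(n, base):
--     """
--     Find the integer log of n with respect to the base.
--
--     >>> import math
--     >>> for base in range(2, 16 + 1):
--     ...     for n in range(1, 1000):
--     ...         assert ilog(n, base) == int(math.log(n, base) + 1e-10), '%s %s' % (n, base)
--     """
--
--     if abs(n) < 1:
--         n = 1/n
--
--     count = 0
--     while n >= base:
--         count += 1
--         n //= base
--     return count
-- ===== SOURCE B (Python) =====
-- def ilog(n, base):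
--     """Integer log of n base `base`, via exponential doubling: each outer step
--     strips the largest squared power base^e with (base^e)^2 <= n in one division."""
--     if abs(n) < 1:
--         n = 1 / n
--     count = 0
--     while n >= base:
--         p, e = base, 1
--         while p * p <= n:
--             p, e = p * p, 2 * e
--         count += e
--         n //= p
--     return count
-- ===== Notes on version B (the rewrite author's own statement) =====
-- stated objective: alternative
-- what changed: A divides n by base once per outer step (one step per unit of the log); B strips, each outer step, the largest repeatedly-squared power base^e with (base^e)^2 <= n in one division, accumulating e (asymptotically fewer divisions, though not measurably faster at |n| <= 2^31).
-- outside the precondition, e.g. on ilog(0, 5): A raises ZeroDivisionError, B raises ZeroDivisionError; on ilog(5, -2): A returns 1, B does not finish within the time limit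
import Mathlib
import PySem

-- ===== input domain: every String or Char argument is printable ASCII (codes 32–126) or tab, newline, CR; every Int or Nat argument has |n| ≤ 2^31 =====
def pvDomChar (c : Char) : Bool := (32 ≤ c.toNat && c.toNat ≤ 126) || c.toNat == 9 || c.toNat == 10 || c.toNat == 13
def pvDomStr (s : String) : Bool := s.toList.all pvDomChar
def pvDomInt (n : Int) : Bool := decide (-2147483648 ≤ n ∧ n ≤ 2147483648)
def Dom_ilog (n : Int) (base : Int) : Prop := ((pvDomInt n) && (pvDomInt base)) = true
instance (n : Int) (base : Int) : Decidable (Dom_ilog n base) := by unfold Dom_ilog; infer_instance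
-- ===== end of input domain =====

-- ilog: integer log of n base `base`. B replaces A's one-division-at-a-time loop by
-- exponential doubling (squaring the power, then dividing by the largest squared power);
-- equivalence is proved on Pre_ilog (n ≠ 0, and base ≥ 2 unless the loop is never entered).


-- ===== PORT A =====
-- Python A's opening guard `if abs(n) < 1: n = 1/n` fires on Int input only for n = 0, where
-- it raises ZeroDivisionError; Pre_ilog excludes n = 0, so the port carries no branch for it.
-- `while n >= base: count += 1; n //= base`.  The loop runs on Nat fuel n.toNat (each pass
-- strictly shrinks n.toNat, so the fuel is never exhausted); the `2 ≤ base` part of the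
-- guard is only a totality guard: inside Pre_ilog the loop body is reached exactly when
-- Python reaches it, and fuel 0 is reached only with n ≤ 0, where the guard is false anyway.
def ilogGo : Nat → Int → Int → Int → Int
  | 0, _, _, count => count
  | fuel + 1, n, base, count =>
    if 2 ≤ base ∧ base ≤ n then ilogGo fuel (PySem.Int.floordiv n base) base (count + 1)
    else count

def ilog (n : Int) (base : Int) : Int := ilogGo n.toNat n base 0

-- ===== PORT B =====
-- inner `while p * p <= n: p, e = p * p, 2 * e`; fuel (n - p).toNat bounds the passes
-- (each pass strictly shrinks (n - p).toNat); `2 ≤ p` is only a totality guard.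
def pvDouble : Nat → Int → Int → Int → Int × Int
  | 0, _, p, e => (p, e)
  | fuel + 1, n, p, e =>
    if 2 ≤ p ∧ p * p ≤ n then pvDouble fuel n (p * p) (2 * e) else (p, e)

-- outer `while n >= base: <doubling>; count += e; n //= p`; fuel and guard as in ilogGo.
def pvAltGo : Nat → Int → Int → Int → Int
  | 0, _, _, count => count
  | fuel + 1, n, base, count =>
    if 2 ≤ base ∧ base ≤ n then
      let pe := pvDouble (n - base).toNat n base 1
      pvAltGo fuel (PySem.Int.floordiv n pe.1) base (count + pe.2)
    else count

def ilog_alt (n : Int) (base : Int) : Int := pvAltGo n.toNat n base 0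

-- ===== PRECONDITION & SPEC =====
-- Pre_ilog excludes n = 0 (A raises ZeroDivisionError) and base ≤ 1 with n ≥ base, where A
-- never terminates with a meaningful log (base 1 loops forever, base 0 raises, a negative
-- base yields a degenerate loop on which B's doubling loop does not terminate).
def Pre_ilog (n : Int) (base : Int) : Prop := n ≠ 0 ∧ (2 ≤ base ∨ n < base)
instance (n : Int) (base : Int) : Decidable (Pre_ilog n base) := by unfold Pre_ilog; infer_instance
def pvWitness_ilog : Int × Int := (1000, 3)

def Spec_ilog (n : Int) (base : Int) (out : Int) : Prop := out = ilog_alt n base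
instance (n : Int) (base : Int) (out : Int) : Decidable (Spec_ilog n base out) := by unfold Spec_ilog; infer_instance

-- ===== CLAIM (what is proved, stated in full; the proofs are below) =====
def Claim_equal_ilog : Prop := ∀ (n : Int) (base : Int), Dom_ilog n base → Pre_ilog n base → Spec_ilog n base (ilog n base)

-- ===== LEMMAS AND PROOFS =====

theorem pv_floordiv_toNat_lt {n d : Int} (hd : 2 ≤ d) (hn : 1 ≤ n) :
    (PySem.Int.floordiv n d).toNat < n.toNat := by
  have h1 : PySem.Int.floordiv n d < n :=
    (PySem.Int.floordiv_lt_iff_lt_mul (by omega)).mpr (by nlinarith)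
  have h2 : (0 : Int) ≤ PySem.Int.floordiv n d :=
    (PySem.Int.le_floordiv_iff_mul_le (by omega)).mpr (by omega)
  omega

-- A's loop with accumulator c equals c plus the loop started at 0 (same fuel).
theorem ilogGo_acc : ∀ (f : Nat) (n base c : Int),
    ilogGo f n base c = c + ilogGo f n base 0 := by
  intro f
  induction f with
  | zero => intro n base c; simp [ilogGo]
  | succ f ih =>
    intro n base c
    simp only [ilogGo]
    split_ifs with hg
    · rw [ih _ base (c + 1), ih _ base (0 + 1)]
      omega
    · omega

-- A's loop does not depend on the fuel once the fuel dominates n.toNat.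
theorem ilogGo_fuel : ∀ (f g : Nat) (n base c : Int), n.toNat ≤ f → n.toNat ≤ g →
    ilogGo f n base c = ilogGo g n base c := by
  intro f
  induction f with
  | zero =>
    intro g n base c hf hg
    cases g with
    | zero => rfl
    | succ g =>
      have : ¬ (2 ≤ base ∧ base ≤ n) := by omega
      simp [ilogGo, this]
  | succ f ih =>
    intro g n base c hf hg
    cases g with
    | zero =>
      have : ¬ (2 ≤ base ∧ base ≤ n) := by omega
      simp [ilogGo, this]
    | succ g =>
      simp only [ilogGo]
      split_ifs with hgd
      · have hlt := pv_floordiv_toNat_lt hgd.1 (by omega : (1:Int) ≤ n)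
        exact ih g _ base (c + 1) (by omega) (by omega)
      · rfl

-- when the loop guard is false, A's loop returns the accumulator at once
theorem ilogGo_guard_false {n base c : Int} (h : ¬ (2 ≤ base ∧ base ≤ n)) :
    ∀ f : Nat, ilogGo f n base c = c := by
  intro f
  cases f with
  | zero => rfl
  | succ f => simp [ilogGo, h]

-- one unrolling of A's loop
theorem ilog_step {n base : Int} (h : 2 ≤ base ∧ base ≤ n) :
    ilog n base = 1 + ilog (PySem.Int.floordiv n base) base := by
  have hn1 : (1:Int) ≤ n := by omega
  have hlt := pv_floordiv_toNat_lt h.1 hn1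
  unfold ilog
  obtain ⟨k, hk⟩ : ∃ k, n.toNat = k + 1 := ⟨n.toNat - 1, by omega⟩
  rw [hk]
  simp only [ilogGo, if_pos h]
  rw [ilogGo_acc k _ base (0 + 1),
    ilogGo_fuel k (PySem.Int.floordiv n base).toNat _ base 0 (by omega) le_rfl]
  omega

-- invariant of the doubling loop: if stripping one factor p costs e steps of A's loop,
-- the result (q, f) of pvDouble satisfies the same with q, f; q stays ≥ 2 and ≤ n.
theorem pvDouble_good : ∀ (fuel : Nat) (base n p e : Int), 2 ≤ p → p ≤ n →
    (∀ x : Int, p ≤ x → ilog x base = e + ilog (PySem.Int.floordiv x p) base) →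
    2 ≤ (pvDouble fuel n p e).1 ∧ (pvDouble fuel n p e).1 ≤ n ∧
      ∀ x : Int, (pvDouble fuel n p e).1 ≤ x →
        ilog x base = (pvDouble fuel n p e).2 + ilog (PySem.Int.floordiv x (pvDouble fuel n p e).1) base := by
  intro fuel
  induction fuel with
  | zero => intro base n p e hp hpn hgood; exact ⟨hp, hpn, hgood⟩
  | succ fuel ih =>
    intro base n p e hp hpn hgood
    simp only [pvDouble]
    split_ifs with hg
    · have hpp : p + p ≤ p * p := by nlinarith
      refine ih base n (p * p) (2 * e) (by omega) hg.2 ?_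
      intro x hx
      have hxp : p ≤ x := by omega
      have hdivge : p ≤ PySem.Int.floordiv x p :=
        (PySem.Int.le_floordiv_iff_mul_le (by omega)).mpr hx
      rw [hgood x hxp, hgood (PySem.Int.floordiv x p) hdivge]
      simp only [PySem.Int.floordiv_eq_ediv_of_pos (show (0:Int) < p by omega),
        PySem.Int.floordiv_eq_ediv_of_pos (show (0:Int) < p * p by nlinarith),
        Int.ediv_ediv_of_nonneg (show (0:Int) ≤ p by omega)]
      omega
    · exact ⟨hp, hpn, hgood⟩

-- B's outer loop computes A's loop (with accumulator), given enough fuel.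
theorem pvAltGo_eq : ∀ (fuel : Nat) (n base c : Int), n.toNat ≤ fuel → 2 ≤ base →
    pvAltGo fuel n base c = c + ilog n base := by
  intro fuel
  induction fuel with
  | zero =>
    intro n base c h hb
    have hgf : ¬ (2 ≤ base ∧ base ≤ n) := by omega
    unfold ilog
    rw [ilogGo_guard_false hgf]
    simp [pvAltGo]
  | succ fuel ih =>
    intro n base c h hb
    simp only [pvAltGo]
    split_ifs with hg
    · have hgood1 : ∀ x : Int, base ≤ x →
          ilog x base = 1 + ilog (PySem.Int.floordiv x base) base :=
        fun x hx => ilog_step ⟨hb, hx⟩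
      obtain ⟨hq2, hqn, hgood⟩ :=
        pvDouble_good (n - base).toNat base n base 1 hb hg.2 hgood1
      have hlt := pv_floordiv_toNat_lt hq2 (by omega : (1:Int) ≤ n)
      rw [ih _ base _ (by omega) hb, hgood n hqn]
      omega
    · unfold ilog
      rw [ilogGo_guard_false hg]
      omega

-- ===== VERDICT (by name: the statement is the Claim_ definition above) =====
theorem ilog_spec : Claim_equal_ilog := by
  intro n base _ hpre
  unfold Spec_ilog ilog_alt
  rcases hpre.2 with hb | hnb
  · rw [pvAltGo_eq n.toNat n base 0 le_rfl hb]
    omega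
  · have hg : ¬ (2 ≤ base ∧ base ≤ n) := by omega
    unfold ilog
    rw [ilogGo_guard_false hg]
    cases hf : n.toNat with
    | zero => rfl
    | succ f => simp [pvAltGo, hg]
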